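-- pv_equiv track=rewrite | github.com/Enzhine/FitFoodieBackendStub | server.py | is_dish_allowed
-- ===== SOURCE A (Python) =====
-- def is_dish_allowed(dish, user):
--     if not user:
--         return True
--     for tag in dish.get("tags", []):
--         if tag == "MEAT" and user.get("meatPreference") == "EXCL":
--             return False
--         if tag == "FISH" and user.get("fishPreference") == "EXCL":
--             return False
--         if tag == "MILK" and user.get("milkPreference") == "EXCL":
--             return False
--     return True
-- ===== SOURCE B (Python) =====
-- _PREF_TAG = {"meatPreference": "MEAT", "fishPreference": "FISH", "milkPreference": "MILK"}
--
--
-- def is_dish_allowed(dish, user):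
--     if not user:
--         return True
--     tags = dish.get("tags", [])
--     return not any(val == "EXCL" and _PREF_TAG.get(key) in tags
--                    for key, val in user.items())
-- ===== Notes on version B (the rewrite author's own statement) =====
-- stated objective: alternative
-- what changed: B inverts the traversal: instead of scanning the dish's tags and testing each against three inline user-preference conditionals, it iterates the user's preference entries, maps each EXCL preference key to its tag via a key->tag table, and rejects if that tag occurs in the dish's tag list.
import Mathlib
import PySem

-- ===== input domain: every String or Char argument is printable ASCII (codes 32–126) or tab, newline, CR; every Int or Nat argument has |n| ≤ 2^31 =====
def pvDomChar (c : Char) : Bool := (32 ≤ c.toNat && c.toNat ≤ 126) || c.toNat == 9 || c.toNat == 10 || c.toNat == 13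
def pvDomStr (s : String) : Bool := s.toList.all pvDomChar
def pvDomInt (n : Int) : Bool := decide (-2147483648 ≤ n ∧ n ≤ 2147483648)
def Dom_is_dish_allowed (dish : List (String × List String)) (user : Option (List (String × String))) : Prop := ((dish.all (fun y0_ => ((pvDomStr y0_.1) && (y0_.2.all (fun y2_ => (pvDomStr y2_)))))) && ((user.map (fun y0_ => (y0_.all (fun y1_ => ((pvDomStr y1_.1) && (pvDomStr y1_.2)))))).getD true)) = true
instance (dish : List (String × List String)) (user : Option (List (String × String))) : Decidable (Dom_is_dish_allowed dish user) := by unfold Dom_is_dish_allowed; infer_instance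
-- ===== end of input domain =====

-- ===== PORT A =====
-- header: B iterates the user's preference entries (mapping each EXCL preference key to its tag
-- and testing membership in the dish's tags) instead of A's scan over the dish's tags with three
-- inline conditionals per tag (alternative traversal, same cost class).
def loopA (u : PySem.Dict String String) : List String → Bool
  | [] => true
  | t :: ts =>
    if t == "MEAT" && (u.get? "meatPreference" == some "EXCL") then false
    else if t == "FISH" && (u.get? "fishPreference" == some "EXCL") then false
    else if t == "MILK" && (u.get? "milkPreference" == some "EXCL") then false
    else loopA u ts

def is_dish_allowed (dish : List (String × List String)) (user : Option (List (String × String))) : Bool :=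
  match user with
  | none => true
  | some u =>
    if u.isEmpty then true
    else loopA (PySem.Dict.mk u) ((PySem.Dict.mk dish).getD "tags" [])

-- ===== PORT B =====
def prefTag : PySem.Dict String String :=
  PySem.Dict.mk [("meatPreference", "MEAT"), ("fishPreference", "FISH"), ("milkPreference", "MILK")]

def is_dish_allowed_alt (dish : List (String × List String)) (user : Option (List (String × String))) : Bool :=
  match user with
  | none => true
  | some u =>
    if u.isEmpty then true
    else
      let tags := (PySem.Dict.mk dish).getD "tags" []
      !((PySem.Dict.mk u).items.any (fun p =>
          p.2 == "EXCL" &&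
            (match prefTag.get? p.1 with
             | some t => tags.contains t
             | none => false)))    -- _PREF_TAG.get(key) is None here; 'None in tags' is False (tags : list[str])

-- ===== PRECONDITION & SPEC =====
-- Pre_ only requires the user association list to have distinct keys: it encodes a Python dict,
-- whose keys are necessarily unique, so no input the Python A actually receives is excluded.
def Pre_is_dish_allowed (dish : List (String × List String)) (user : Option (List (String × String))) : Prop :=
  ((user.getD []).map Prod.fst).Nodup
instance (dish : List (String × List String)) (user : Option (List (String × String))) : Decidable (Pre_is_dish_allowed dish user) := by unfold Pre_is_dish_allowed; infer_instance
def pvWitness_is_dish_allowed : (List (String × List String)) × (Option (List (String × String))) :=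
  ([("tags", ["MEAT", "FISH"])], some [("meatPreference", "EXCL")])

def Spec_is_dish_allowed (dish : List (String × List String)) (user : Option (List (String × String))) (out : Bool) : Prop := out = is_dish_allowed_alt dish user
instance (dish : List (String × List String)) (user : Option (List (String × String))) (out : Bool) : Decidable (Spec_is_dish_allowed dish user out) := by unfold Spec_is_dish_allowed; infer_instance

-- ===== CLAIM (what is proved, stated in full; the proofs are below) =====
def Claim_equal_is_dish_allowed : Prop := ∀ (dish : List (String × List String)) (user : Option (List (String × String))), Dom_is_dish_allowed dish user → Pre_is_dish_allowed dish user → Spec_is_dish_allowed dish user (is_dish_allowed dish user)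

-- ===== LEMMAS AND PROOFS =====

-- A's loop returns false exactly when some tag of the list is one of the three forbidden ones.
lemma loopA_eq_false_iff (u : PySem.Dict String String) (ts : List String) :
    loopA u ts = false ↔ ∃ t ∈ ts,
      (t = "MEAT" ∧ u.get? "meatPreference" = some "EXCL") ∨
      (t = "FISH" ∧ u.get? "fishPreference" = some "EXCL") ∨
      (t = "MILK" ∧ u.get? "milkPreference" = some "EXCL") := by
  induction ts with
  | nil => simp [loopA]
  | cons t ts ih =>
    simp only [loopA]
    split_ifs with h1 h2 h3
    · simp only [Bool.and_eq_true, beq_iff_eq] at h1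
      constructor
      · intro _; exact ⟨t, List.mem_cons_self, Or.inl ⟨h1.1, by simpa using h1.2⟩⟩
      · intro _; rfl
    · simp only [Bool.and_eq_true, beq_iff_eq] at h2
      constructor
      · intro _; exact ⟨t, List.mem_cons_self, Or.inr (Or.inl ⟨h2.1, by simpa using h2.2⟩)⟩
      · intro _; rfl
    · simp only [Bool.and_eq_true, beq_iff_eq] at h3
      constructor
      · intro _; exact ⟨t, List.mem_cons_self, Or.inr (Or.inr ⟨h3.1, by simpa using h3.2⟩)⟩
      · intro _; rfl
    · rw [ih]
      constructor
      · rintro ⟨x, hx, hcase⟩; exact ⟨x, List.mem_cons_of_mem _ hx, hcase⟩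
      · rintro ⟨x, hx, hcase⟩
        rcases List.mem_cons.1 hx with rfl | hx'
        · rcases hcase with ⟨rfl, hg⟩ | ⟨rfl, hg⟩ | ⟨rfl, hg⟩
          · exact absurd (by simp [hg]) h1
          · exact absurd (by simp [hg]) h2
          · exact absurd (by simp [hg]) h3
        · exact ⟨x, hx', hcase⟩

-- prefTag's lookup, characterised.
lemma prefTag_get? (k : String) :
    prefTag.get? k =
      if "meatPreference" = k then some "MEAT"
      else if "fishPreference" = k then some "FISH"
      else if "milkPreference" = k then some "MILK"
      else none := by
  by_cases h1 : "meatPreference" = k <;> by_cases h2 : "fishPreference" = k <;>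
    by_cases h3 : "milkPreference" = k <;>
    simp [prefTag, PySem.Dict.get?, h1, h2, h3, beq_iff_eq]

-- B's scan over the user's entries rejects exactly when A's scan over the tags does.
lemma any_items_iff (u : PySem.Dict String String) (ts : List String)
    (hnd : u.keys.Nodup) :
    (u.items.any (fun p =>
        p.2 == "EXCL" &&
          (match prefTag.get? p.1 with
           | some t => ts.contains t
           | none => false))) = true ↔ ∃ t ∈ ts,
      (t = "MEAT" ∧ u.get? "meatPreference" = some "EXCL") ∨
      (t = "FISH" ∧ u.get? "fishPreference" = some "EXCL") ∨
      (t = "MILK" ∧ u.get? "milkPreference" = some "EXCL") := by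
  rw [List.any_eq_true]
  constructor
  · rintro ⟨⟨k, v⟩, hmem, hp⟩
    simp only [Bool.and_eq_true, beq_iff_eq] at hp
    obtain ⟨rfl, hm⟩ := hp
    have hget := PySem.Dict.get?_of_mem_items u hmem hnd
    rw [prefTag_get? k] at hm
    split_ifs at hm with a b c
    · exact ⟨"MEAT", by simpa using hm, Or.inl ⟨rfl, by rw [a]; exact hget⟩⟩
    · exact ⟨"FISH", by simpa using hm, Or.inr (Or.inl ⟨rfl, by rw [b]; exact hget⟩)⟩
    · exact ⟨"MILK", by simpa using hm, Or.inr (Or.inr ⟨rfl, by rw [c]; exact hget⟩)⟩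
  · rintro ⟨t, hts, hcase⟩
    rcases hcase with ⟨rfl, hg⟩ | ⟨rfl, hg⟩ | ⟨rfl, hg⟩
    · exact ⟨("meatPreference", "EXCL"), PySem.Dict.mem_items_of_get?_eq_some u hg,
        by simp [prefTag_get?, hts]⟩
    · exact ⟨("fishPreference", "EXCL"), PySem.Dict.mem_items_of_get?_eq_some u hg,
        by simp [prefTag_get?, hts]⟩
    · exact ⟨("milkPreference", "EXCL"), PySem.Dict.mem_items_of_get?_eq_some u hg,
        by simp [prefTag_get?, hts]⟩

-- The two scans agree (as Booleans) for any tag list, under unique user keys.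
lemma loopA_eq_not_any (u : PySem.Dict String String) (ts : List String)
    (hnd : u.keys.Nodup) :
    loopA u ts = !(u.items.any (fun p =>
        p.2 == "EXCL" &&
          (match prefTag.get? p.1 with
           | some t => ts.contains t
           | none => false))) := by
  cases hB : u.items.any (fun p =>
      p.2 == "EXCL" &&
        (match prefTag.get? p.1 with
         | some t => ts.contains t
         | none => false)) with
  | true =>
    simp only [Bool.not_true]
    exact (loopA_eq_false_iff u ts).2 ((any_items_iff u ts hnd).1 hB)
  | false =>
    simp only [Bool.not_false]
    by_contra hA
    have hA' : loopA u ts = false := by revert hA; cases loopA u ts <;> simp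
    have h2 := (any_items_iff u ts hnd).2 ((loopA_eq_false_iff u ts).1 hA')
    rw [hB] at h2
    exact Bool.false_ne_true h2

-- ===== VERDICT (by name: the statement is the Claim_ definition above) =====
theorem is_dish_allowed_spec : Claim_equal_is_dish_allowed := by
  intro dish user _ hpre
  unfold Spec_is_dish_allowed is_dish_allowed is_dish_allowed_alt
  cases user with
  | none => rfl
  | some u =>
    by_cases h : u.isEmpty
    · simp [h]
    · simp only [h, Bool.false_eq_true, if_false]
      have hnd : (PySem.Dict.mk u).keys.Nodup := by
        simpa [PySem.Dict.keys] using hpre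
      exact loopA_eq_not_any (PySem.Dict.mk u) ((PySem.Dict.mk dish).getD "tags" []) hnd
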